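-- pv_equiv track=rewrite | github.com/ProzorroUKR/openprocurement.api | src/openprocurement/tender/core/procedure/utils.py | contracts_allow_to_complete
-- ===== SOURCE A (Python) =====
-- def contracts_allow_to_complete(contracts) -> bool:
--     active_exists = False
--     for contract in contracts:
--         if contract.get("status") == "pending":
--             return False
--         if contract.get("status") == "active":
--             active_exists = True
--     return active_exists
-- ===== SOURCE B (Python) =====
-- def contracts_allow_to_complete(contracts) -> bool:
--     def rank(contract):
--         status = contract.get("status")
--         if status == "pending":
--             return 2
--         if status == "active":
--             return 1
--         return 0
--     return max(map(rank, contracts), default=0) == 1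
-- ===== Notes on version B (the rewrite author's own statement) =====
-- stated objective: alternative
-- what changed: Replaces the early-exit boolean flag loop with an arithmetical reduction: each status is encoded as a severity (pending=2, active=1, other=0), the severities are reduced with max, and the answer is whether the maximum equals 1.
import Mathlib
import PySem

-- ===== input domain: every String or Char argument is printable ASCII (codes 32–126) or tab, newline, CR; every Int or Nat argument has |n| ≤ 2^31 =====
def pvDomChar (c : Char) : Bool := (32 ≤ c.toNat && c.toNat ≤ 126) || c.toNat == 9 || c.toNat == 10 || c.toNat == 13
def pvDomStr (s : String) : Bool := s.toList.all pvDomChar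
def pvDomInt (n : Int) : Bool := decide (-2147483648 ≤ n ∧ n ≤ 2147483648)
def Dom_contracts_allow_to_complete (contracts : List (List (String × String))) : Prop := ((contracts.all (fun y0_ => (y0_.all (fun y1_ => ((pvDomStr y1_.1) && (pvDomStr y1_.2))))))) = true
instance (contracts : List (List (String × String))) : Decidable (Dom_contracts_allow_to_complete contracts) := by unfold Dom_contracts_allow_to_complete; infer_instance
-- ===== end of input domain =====

-- B replaces A's early-exit flag loop by an arithmetical max-reduction over a severity encoding of statuses (pending=2, active=1, other=0; answer: max == 1); objective: alternative.


-- ===== PORT A =====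
-- A's for-loop with the mutable flag 'active_exists' and the early 'return False'.
def contracts_allow_to_complete_go : List (List (String × String)) → Bool → Bool
  | [], active_exists => active_exists
  | contract :: rest, active_exists =>
    if PySem.Dict.get? (PySem.Dict.mk contract) "status" == some "pending" then false
    else contracts_allow_to_complete_go rest
      (if PySem.Dict.get? (PySem.Dict.mk contract) "status" == some "active" then true else active_exists)

def contracts_allow_to_complete (contracts : List (List (String × String))) : Bool :=
  contracts_allow_to_complete_go contracts false

-- ===== PORT B =====
-- the inner helper 'rank': severity of one contract's status
def pvRank (contract : List (String × String)) : Nat :=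
  let status := PySem.Dict.get? (PySem.Dict.mk contract) "status"
  if status == some "pending" then 2
  else if status == some "active" then 1
  else 0

-- max(map(rank, contracts), default=0) == 1
def contracts_allow_to_complete_alt (contracts : List (List (String × String))) : Bool :=
  ((contracts.map pvRank).foldl Nat.max 0) == 1

-- ===== PRECONDITION & SPEC =====
def Spec_contracts_allow_to_complete (contracts : List (List (String × String))) (out : Bool) : Prop := out = contracts_allow_to_complete_alt contracts
instance (contracts : List (List (String × String))) (out : Bool) : Decidable (Spec_contracts_allow_to_complete contracts out) := by unfold Spec_contracts_allow_to_complete; infer_instance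

-- ===== CLAIM (what is proved, stated in full; the proofs are below) =====
def Claim_equal_contracts_allow_to_complete : Prop := ∀ (contracts : List (List (String × String))), Dom_contracts_allow_to_complete contracts → Spec_contracts_allow_to_complete contracts (contracts_allow_to_complete contracts)

-- ===== LEMMAS AND PROOFS =====
-- Characterisation of A's loop: it returns (no pending) && (active occurs || flag).
theorem contracts_allow_to_complete_go_eq (l : List (List (String × String))) (acc : Bool) :
    contracts_allow_to_complete_go l acc =
      (!(l.map (fun c => PySem.Dict.get? (PySem.Dict.mk c) "status")).contains (some "pending")
        && ((l.map (fun c => PySem.Dict.get? (PySem.Dict.mk c) "status")).contains (some "active") || acc)) := by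
  induction l generalizing acc with
  | nil => simp [contracts_allow_to_complete_go]
  | cons c rest ih =>
    rw [contracts_allow_to_complete_go]
    by_cases hp : PySem.Dict.get? (PySem.Dict.mk c) "status" = some "pending"
    · rw [if_pos (by simp [hp])]
      simp [hp]
    · rw [if_neg (by simp [hp]), ih]
      by_cases ha : PySem.Dict.get? (PySem.Dict.mk c) "status" = some "active"
      · simp [ha]
      · have hp' : ¬ some "pending" = PySem.Dict.get? (PySem.Dict.mk c) "status" := fun h => hp h.symm
        have ha' : ¬ some "active" = PySem.Dict.get? (PySem.Dict.mk c) "status" := fun h => ha h.symm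
        simp [ha, hp', ha']

theorem foldl_max_shift (l : List Nat) (a : Nat) :
    l.foldl Nat.max a = Nat.max a (l.foldl Nat.max 0) := by
  induction l generalizing a with
  | nil => simp
  | cons b t ih =>
    simp only [List.foldl_cons]
    rw [ih (Nat.max a b), ih (Nat.max 0 b)]
    simp [Nat.max_assoc]

-- Characterisation of B's reduction as an if-chain over the two membership tests.
theorem fold_rank_char (l : List (List (String × String))) :
    (l.map pvRank).foldl Nat.max 0 =
      (if (l.map (fun c => PySem.Dict.get? (PySem.Dict.mk c) "status")).contains (some "pending") then 2
       else if (l.map (fun c => PySem.Dict.get? (PySem.Dict.mk c) "status")).contains (some "active") then 1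
       else 0) := by
  induction l with
  | nil => simp
  | cons c rest ih =>
    simp only [List.map_cons, List.foldl_cons]
    rw [foldl_max_shift, ih]
    simp only [List.contains_cons, Bool.or_eq_true, beq_iff_eq, Nat.zero_max]
    by_cases hp : some "pending" = PySem.Dict.get? (PySem.Dict.mk c) "status"
    · rw [if_pos (Or.inl hp)]
      simp [pvRank, ← hp]
      split_ifs <;> simp_all
    · by_cases ha : some "active" = PySem.Dict.get? (PySem.Dict.mk c) "status"
      · simp [pvRank, ← ha]
        split_ifs <;> simp_all
      · have hp' : ¬ PySem.Dict.get? (PySem.Dict.mk c) "status" = some "pending" := fun h => hp h.symm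
        have ha' : ¬ PySem.Dict.get? (PySem.Dict.mk c) "status" = some "active" := fun h => ha h.symm
        simp [pvRank, hp, ha, hp', ha']

-- ===== VERDICT (by name: the statement is the Claim_ definition above) =====
theorem contracts_allow_to_complete_spec : Claim_equal_contracts_allow_to_complete := by
  intro contracts _
  show contracts_allow_to_complete contracts = contracts_allow_to_complete_alt contracts
  rw [contracts_allow_to_complete, contracts_allow_to_complete_alt,
    contracts_allow_to_complete_go_eq, fold_rank_char]
  cases hp : (contracts.map (fun c => PySem.Dict.get? (PySem.Dict.mk c) "status")).contains (some "pending") <;>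
    cases ha : (contracts.map (fun c => PySem.Dict.get? (PySem.Dict.mk c) "status")).contains (some "active") <;>
    simp
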